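-- pv_equiv track=rewrite | github.com/ezychowicz/DSA | ASD/egzaminy/egz2022_2.py | coal
-- ===== SOURCE A (Python) =====
-- def coal(A,T):
--     N = len(A)
--     storages = [T]*N
--     for delivery in A:
--         i = 0
--         while storages[i] < delivery:
--             i += 1
--         storages[i] -= delivery
--     return i
-- ===== SOURCE B (Python) =====
-- def coal(A, T):
--     n = len(A)
--     if n == 0:
--         raise ValueError("no deliveries")
--     # segment tree of remaining capacities; node = [max, left_size, left, right]
--     def build(size):
--         if size == 1:
--             return [T, 0, None, None]
--         half = size // 2
--         return [T, half, build(half), build(size - half)]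
--     def query(t, d):  # leftmost index with capacity >= d; assumes t[0] >= d
--         if t[2] is None:
--             return 0
--         if t[2][0] >= d:
--             return query(t[2], d)
--         return t[1] + query(t[3], d)
--     def update(t, i, d):
--         if t[2] is None:
--             t[0] -= d
--             return
--         if i < t[1]:
--             update(t[2], i, d)
--         else:
--             update(t[3], i - t[1], d)
--         t[0] = max(t[2][0], t[3][0])
--     root = build(n)
--     last = None
--     for d in A:
--         if root[0] < d:
--             raise ValueError("delivery does not fit")
--         i = query(root, d)
--         update(root, i, d)
--         last = i
--     return last
-- ===== Notes on version B (the rewrite author's own statement) =====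
-- stated objective: alternative
-- what changed: Replaced the per-delivery left-to-right linear scan over the storage array by a segment tree of maximum remaining capacities with a leftmost-fit descent query and a point update per delivery (O(M log N) worst case vs A's O(M*N), though not measurably faster on the benchmark's input family).
-- outside the precondition, e.g. on coal([-5, 7], 5): A returns 0, B returns 0
import Mathlib
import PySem

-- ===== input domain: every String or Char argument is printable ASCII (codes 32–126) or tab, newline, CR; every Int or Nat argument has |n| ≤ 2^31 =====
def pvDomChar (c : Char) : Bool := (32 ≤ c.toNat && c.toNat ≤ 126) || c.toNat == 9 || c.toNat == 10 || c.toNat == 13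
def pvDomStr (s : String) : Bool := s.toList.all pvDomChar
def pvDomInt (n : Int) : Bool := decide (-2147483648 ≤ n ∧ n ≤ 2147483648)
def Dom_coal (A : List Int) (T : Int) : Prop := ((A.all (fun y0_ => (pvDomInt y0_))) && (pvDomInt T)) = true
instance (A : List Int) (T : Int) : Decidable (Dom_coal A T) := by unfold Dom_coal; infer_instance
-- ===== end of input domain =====

-- B replaces A's per-delivery linear scan of the storage array by a segment tree of
-- maximum remaining capacities (leftmost-fit descent query + point update per delivery).


-- ===== PORT A =====
-- A's inner `while storages[i] < delivery: i += 1`: walk the list from index i,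
-- none = the scan runs off the end (Python IndexError).
def whileScan (d : Int) : List Int → Nat → Option Nat
  | [], _ => none
  | c :: rest, i => if c < d then whileScan d rest (i + 1) else some i

-- state: none = an exception has occurred; some (storages, i) = current storages and last i
def coalStepA (T : Int) (st : Option (List Int × Nat)) (d : Int) : Option (List Int × Nat) :=
  match st with
  | none => none
  | some (stor, _) =>
    match whileScan d stor 0 with
    | none => none
    | some i => some (stor.set i (stor.getD i 0 - d), i)

def coal (A : List Int) (T : Int) : Int :=
  match A.foldl (coalStepA T) (some (List.replicate A.length T, 0)) with
  | some (_, i) => (i : Int)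
  | none => 0

-- ===== PORT B =====
-- segment tree node: max capacity of the range, size of the left subtree, children
inductive Seg where
  | leaf : Int → Seg
  | node : Int → Nat → Seg → Seg → Seg
deriving Repr

def Seg.mx : Seg → Int
  | .leaf c => c
  | .node m _ _ _ => m

def buildSeg (T : Int) : Nat → Seg
  | 0 => .leaf T
  | 1 => .leaf T
  | (n + 2) => .node T ((n + 2) / 2) (buildSeg T ((n + 2) / 2)) (buildSeg T ((n + 2) - (n + 2) / 2))
decreasing_by all_goals omega

-- leftmost index with capacity ≥ d; caller guarantees d ≤ t.mx
def queryL : Seg → Int → Nat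
  | .leaf _, _ => 0
  | .node _ ls l r, d => if d ≤ l.mx then queryL l d else ls + queryL r d

def updateSeg : Seg → Nat → Int → Seg
  | .leaf c, _, d => .leaf (c - d)
  | .node _ ls l r, i, d =>
    if i < ls then
      let l' := updateSeg l i d
      .node (max l'.mx r.mx) ls l' r
    else
      let r' := updateSeg r (i - ls) d
      .node (max l.mx r'.mx) ls l r'

-- state: none = an exception has occurred; some (tree, last index placed)
def coalStepB (st : Option (Seg × Nat)) (d : Int) : Option (Seg × Nat) :=
  match st with
  | none => none
  | some (t, _) =>
    if t.mx < d then none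
    else
      let i := queryL t d
      some (updateSeg t i d, i)

def coal_alt (A : List Int) (T : Int) : Int :=
  match A.foldl coalStepB (some (buildSeg T A.length, 0)) with
  | some (_, i) => (i : Int)
  | none => 0

-- ===== PRECONDITION & SPEC =====
-- Pre_ excludes the empty list (A's `i` is unbound: NameError) and deliveries exceeding T,
-- on which A's first-fit scan generally runs off the storage list (IndexError) — though A can
-- still return on such inputs when earlier negative deliveries left surplus capacity.
def Pre_coal (A : List Int) (T : Int) : Prop := A ≠ [] ∧ ∀ d ∈ A, d ≤ T
instance (A : List Int) (T : Int) : Decidable (Pre_coal A T) := by unfold Pre_coal; infer_instance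

def pvWitness_coal : List Int × Int := ([3, 1, 2], 3)

def Spec_coal (A : List Int) (T : Int) (out : Int) : Prop := out = coal_alt A T
instance (A : List Int) (T : Int) (out : Int) : Decidable (Spec_coal A T out) := by unfold Spec_coal; infer_instance

-- ===== CLAIM (what is proved, stated in full; the proofs are below) =====
def Claim_equal_coal : Prop := ∀ (A : List Int) (T : Int), Dom_coal A T → Pre_coal A T → Spec_coal A T (coal A T)

-- ===== LEMMAS AND PROOFS =====

def Seg.toList : Seg → List Int
  | .leaf c => [c]
  | .node _ _ l r => l.toList ++ r.toList

-- the segment-tree invariant: node max = max of children, left size = length of left range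
def Seg.good : Seg → Prop
  | .leaf _ => True
  | .node m ls l r => m = max l.mx r.mx ∧ ls = l.toList.length ∧ l.good ∧ r.good

theorem seg_le_mx (t : Seg) (h : t.good) : ∀ x ∈ t.toList, x ≤ t.mx := by
  induction t with
  | leaf c => simp [Seg.mx, Seg.toList]
  | node m ls l r ihl ihr =>
    obtain ⟨hm, -, hl, hr⟩ := h
    intro x hx
    simp only [Seg.toList, List.mem_append] at hx
    simp only [Seg.mx, hm]
    rcases hx with hx | hx
    · exact le_max_of_le_left (ihl hl x hx)
    · exact le_max_of_le_right (ihr hr x hx)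

theorem whileScan_append (d : Int) (xs ys : List Int) (i : Nat) :
    whileScan d (xs ++ ys) i =
      match whileScan d xs i with
      | some j => some j
      | none => whileScan d ys (i + xs.length) := by
  induction xs generalizing i with
  | nil => simp [whileScan]
  | cons c rest ih =>
    simp only [List.cons_append, whileScan]
    split_ifs with h
    · rw [ih]
      simp only [List.length_cons]
      ring_nf
    · rfl

theorem whileScan_none (d : Int) (xs : List Int) (i : Nat)
    (h : ∀ x ∈ xs, x < d) : whileScan d xs i = none := by
  induction xs generalizing i with
  | nil => rfl
  | cons c rest ih =>
    simp only [whileScan, if_pos (h c (List.mem_cons_self))]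
    exact ih _ (fun x hx => h x (List.mem_cons_of_mem _ hx))

theorem whileScan_some_lt (d : Int) (xs : List Int) (i j : Nat)
    (h : whileScan d xs i = some j) : j < i + xs.length := by
  induction xs generalizing i with
  | nil => simp [whileScan] at h
  | cons c rest ih =>
    simp only [whileScan] at h
    split_ifs at h with hc
    · have := ih (i + 1) h; simp only [List.length_cons]; omega
    · simp only [Option.some.injEq] at h
      subst h
      simp only [List.length_cons]
      omega

theorem whileScan_shift_all (d : Int) (xs : List Int) (i : Nat) :
    whileScan d xs i = (whileScan d xs 0).map (fun j => i + j) := by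
  induction xs generalizing i with
  | nil => simp [whileScan]
  | cons c rest ih =>
    simp only [whileScan]
    split_ifs with hc
    · rw [ih (i + 1), ih (0 + 1)]
      cases whileScan d rest 0 with
      | none => simp
      | some k => simp; omega
    · simp

theorem whileScan_shift (d : Int) (xs : List Int) (i j : Nat)
    (h : whileScan d xs 0 = some j) : whileScan d xs i = some (i + j) := by
  rw [whileScan_shift_all, h, Option.map_some]

theorem query_correct (t : Seg) (d : Int) (hg : t.good) (hd : d ≤ t.mx) :
    whileScan d t.toList 0 = some (queryL t d) := by
  induction t with
  | leaf c =>
    simp only [Seg.mx] at hd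
    simp [Seg.toList, whileScan, queryL, not_lt.mpr hd]
  | node m ls l r ihl ihr =>
    obtain ⟨hm, hls, hl, hr⟩ := hg
    simp only [Seg.toList, queryL]
    rw [whileScan_append]
    by_cases hlm : d ≤ l.mx
    · rw [ihl hl hlm]; simp [hlm]
    · have hall : ∀ x ∈ l.toList, x < d := fun x hx =>
        lt_of_le_of_lt (seg_le_mx l hl x hx) (not_le.mp hlm)
      rw [whileScan_none d l.toList 0 hall]
      have hrm : d ≤ r.mx := by
        simp only [Seg.mx, hm] at hd
        rcases le_max_iff.mp hd with h | h
        · exact absurd h hlm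
        · exact h
      simp only [Nat.zero_add]
      rw [whileScan_shift d r.toList l.toList.length (queryL r d) (ihr hr hrm)]
      simp [hlm, hls]

theorem update_spec (t : Seg) (i : Nat) (d : Int) (hg : t.good)
    (hi : i < t.toList.length) :
    (updateSeg t i d).toList = t.toList.set i (t.toList.getD i 0 - d) ∧
      (updateSeg t i d).good := by
  induction t generalizing i with
  | leaf c =>
    simp only [Seg.toList, List.length_cons, List.length_nil] at hi
    interval_cases i
    simp [updateSeg, Seg.toList, Seg.good, List.getD]
  | node m ls l r ihl ihr =>
    obtain ⟨hm, hls, hl, hr⟩ := hg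
    simp only [Seg.toList, List.length_append] at hi
    simp only [Seg.toList, updateSeg]
    by_cases hcase : i < ls
    · simp only [if_pos hcase]
      have hil : i < l.toList.length := by omega
      obtain ⟨hset, hgood⟩ := ihl i hl hil
      constructor
      · simp only [Seg.toList, hset]
        rw [List.getD_append _ _ _ _ hil, List.set_append_left _ _ hil]
      · refine ⟨rfl, ?_, hgood, hr⟩
        rw [hset]; simp [hls]
    · simp only [if_neg hcase]
      have hir : i - ls < r.toList.length := by omega
      obtain ⟨hset, hgood⟩ := ihr (i - ls) hr hir
      constructor
      · simp only [Seg.toList, hset]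
        have hge : l.toList.length ≤ i := by omega
        rw [List.getD_append_right _ _ _ _ hge, List.set_append_right _ _ hge, hls]
      · exact ⟨rfl, hls, hl, hgood⟩

theorem buildSeg_spec (T : Int) (n : Nat) (hn : 1 ≤ n) :
    (buildSeg T n).toList = List.replicate n T ∧ (buildSeg T n).good ∧
      (buildSeg T n).mx = T := by
  induction n using Nat.strong_induction_on with
  | _ n ih =>
    match n, hn with
    | 1, _ => simp [buildSeg, Seg.toList, Seg.good, Seg.mx, List.replicate]
    | (k + 2), _ =>
      have h1 : 1 ≤ (k + 2) / 2 := by omega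
      have h2 : 1 ≤ (k + 2) - (k + 2) / 2 := by omega
      obtain ⟨hlL, hlG, hlM⟩ := ih ((k + 2) / 2) (by omega) h1
      obtain ⟨hrL, hrG, hrM⟩ := ih ((k + 2) - (k + 2) / 2) (by omega) h2
      rw [buildSeg]
      refine ⟨?_, ⟨?_, ?_, hlG, hrG⟩, rfl⟩
      · simp only [Seg.toList, hlL, hrL]
        rw [List.replicate_append_replicate]
        congr 1
        omega
      · rw [hlM, hrM]
        simp
      · rw [hlL]
        simp

-- the simulation relation between the two fold states
def StRel (T : Int) (sa : Option (List Int × Nat)) (sb : Option (Seg × Nat)) : Prop :=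
  match sa, sb with
  | none, none => True
  | some (stor, i), some (t, j) => stor = t.toList ∧ i = j ∧ t.good
  | _, _ => False

theorem step_rel (T : Int) (sa : Option (List Int × Nat)) (sb : Option (Seg × Nat)) (d : Int)
    (h : StRel T sa sb) : StRel T (coalStepA T sa d) (coalStepB sb d) := by
  match sa, sb with
  | none, none => simp [coalStepA, coalStepB, StRel]
  | none, some _ => exact absurd h (by simp [StRel])
  | some _, none => exact absurd h (by simp [StRel])
  | some (stor, i), some (t, j) =>
    obtain ⟨hst, -, hg⟩ := h
    simp only [coalStepA, coalStepB]
    by_cases hmx : t.mx < d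
    · have : whileScan d stor 0 = none := by
        rw [hst]
        exact whileScan_none d t.toList 0
          (fun x hx => lt_of_le_of_lt (seg_le_mx t hg x hx) hmx)
      simp [this, hmx, StRel]
    · have hq := query_correct t d hg (not_lt.mp hmx)
      rw [hst, hq]
      have hlt : queryL t d < t.toList.length := by
        have := whileScan_some_lt d t.toList 0 (queryL t d) hq
        omega
      obtain ⟨hset, hgood⟩ := update_spec t (queryL t d) d hg hlt
      simp only [if_neg hmx]
      exact ⟨hset.symm, rfl, hgood⟩

theorem fold_rel (T : Int) (xs : List Int) (sa : Option (List Int × Nat))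
    (sb : Option (Seg × Nat)) (h : StRel T sa sb) :
    StRel T (xs.foldl (coalStepA T) sa) (xs.foldl coalStepB sb) := by
  induction xs generalizing sa sb with
  | nil => exact h
  | cons d rest ih => exact ih _ _ (step_rel T sa sb d h)

-- ===== VERDICT (by name: the statement is the Claim_ definition above) =====
theorem coal_spec : Claim_equal_coal := by
  intro A T _ hpre
  obtain ⟨hne, -⟩ := hpre
  have hn : 1 ≤ A.length := by
    cases A with
    | nil => exact absurd rfl hne
    | cons a rest => simp
  obtain ⟨hL, hG, -⟩ := buildSeg_spec T A.length hn
  have h0 : StRel T (some (List.replicate A.length T, 0))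
      (some (buildSeg T A.length, 0)) := ⟨hL.symm, rfl, hG⟩
  have hfold := fold_rel T A _ _ h0
  unfold Spec_coal coal coal_alt
  cases ha : A.foldl (coalStepA T) (some (List.replicate A.length T, 0)) with
  | none =>
    cases hb : A.foldl coalStepB (some (buildSeg T A.length, 0)) with
    | none => rfl
    | some p => rw [ha, hb] at hfold; exact absurd hfold (by simp [StRel])
  | some pa =>
    cases hb : A.foldl coalStepB (some (buildSeg T A.length, 0)) with
    | none =>
      rw [ha, hb] at hfold
      obtain ⟨stor, i⟩ := pa
      exact absurd hfold (by simp [StRel])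
    | some pb =>
      rw [ha, hb] at hfold
      obtain ⟨stor, i⟩ := pa
      obtain ⟨t, j⟩ := pb
      obtain ⟨-, hij, -⟩ := hfold
      simp [hij]
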